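-- pv_equiv track=rewrite | github.com/SomeTiramisu/SubsUtils | uuencode.py | ebyte_list2string
-- ===== SOURCE A (Python) =====
-- def ebyte_list2string(ebyte_list):
--     s = ''
--     c = 1
--     for x in ebyte_list:
--         s += chr(x)
--         if not c % 80: s+= '\n'
--         c+=1
--     return s
-- ===== SOURCE B (Python) =====
-- def ebyte_list2string(ebyte_list):
--     parts = []
--     n = len(ebyte_list)
--     i = 0
--     while i < n:
--         block = ebyte_list[i:i+80]
--         parts.append(''.join(chr(x) for x in block))
--         if len(block) == 80:
--             parts.append('\n')
--         i += 80
--     return ''.join(parts)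
-- ===== Notes on version B (the rewrite author's own statement) =====
-- stated objective: alternative
-- what changed: Replaces A's per-element loop with a mod-80 newline counter by a chunked traversal: slice off 80-byte blocks, join each block at once, and append a newline after every full block.
import Mathlib
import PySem

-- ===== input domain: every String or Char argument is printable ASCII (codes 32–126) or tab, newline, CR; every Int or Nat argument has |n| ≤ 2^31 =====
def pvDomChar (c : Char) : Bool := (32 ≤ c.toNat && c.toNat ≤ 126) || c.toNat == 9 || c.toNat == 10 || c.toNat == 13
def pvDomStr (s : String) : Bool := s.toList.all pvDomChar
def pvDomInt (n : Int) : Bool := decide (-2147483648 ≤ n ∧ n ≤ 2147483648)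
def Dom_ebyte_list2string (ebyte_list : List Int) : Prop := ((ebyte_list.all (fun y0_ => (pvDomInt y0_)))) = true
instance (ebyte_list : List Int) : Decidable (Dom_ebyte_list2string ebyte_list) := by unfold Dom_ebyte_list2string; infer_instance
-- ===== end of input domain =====

-- B replaces A's per-element mod-80 counter loop by a chunked traversal (an index advancing
-- by 80, each 80-byte slice joined at once, newline after every full block); same cost,
-- different decomposition.

-- ===== PORT A =====
-- A: s = ''; c = 1; for x: s += chr(x); if not c % 80: s += '\n'; c += 1
def ebyte_list2string (ebyte_list : List Int) : String :=
  let r := ebyte_list.foldl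
    (fun (p : List Char × Int) x =>
      let s := p.1 ++ [Char.ofNat x.toNat]
      let s := if p.2 % 80 = 0 then s ++ ['\n'] else s
      (s, p.2 + 1)) ([], 1)
  String.mk r.1

-- ===== PORT B =====
-- B: i = 0; while i < n: block = lst[i:i+80]; emit block; if len(block)==80 emit '\n'; i += 80
def ebyteChunks (l : List Int) (i : Nat) : List Char :=
  if _h : i < l.length then
    let block := PySem.List.slice l (some (i : Int)) (some ((i : Int) + 80))
    block.map (fun x => Char.ofNat x.toNat)
      ++ (if block.length = 80 then ['\n'] else [])
      ++ ebyteChunks l (i + 80)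
  else []
termination_by l.length - i

def ebyte_list2string_alt (ebyte_list : List Int) : String :=
  String.mk (ebyteChunks ebyte_list 0)

-- ===== PRECONDITION & SPEC =====
-- Pre_ excludes codes on which Python's chr raises ValueError (negative, ≥ 0x110000) — A raises
-- there — and the surrogate codes 0xD800–0xDFFF, on which A and B both return in Python the same
-- string containing a lone surrogate, a value that is not representable as a Lean String (Char
-- holds only Unicode scalar values), so no faithful port exists on those inputs.
def Pre_ebyte_list2string (ebyte_list : List Int) : Prop :=
  ∀ x ∈ ebyte_list, 0 ≤ x ∧ (x < 55296 ∨ (57344 ≤ x ∧ x < 1114112))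
instance (ebyte_list : List Int) : Decidable (Pre_ebyte_list2string ebyte_list) := by
  unfold Pre_ebyte_list2string; infer_instance
def pvWitness_ebyte_list2string : List Int := [72, 105, 33]

def Spec_ebyte_list2string (ebyte_list : List Int) (out : String) : Prop := out = ebyte_list2string_alt ebyte_list
instance (ebyte_list : List Int) (out : String) : Decidable (Spec_ebyte_list2string ebyte_list out) := by unfold Spec_ebyte_list2string; infer_instance

-- ===== CLAIM (what is proved, stated in full; the proofs are below) =====
def Claim_equal_ebyte_list2string : Prop := ∀ (ebyte_list : List Int), Dom_ebyte_list2string ebyte_list → Pre_ebyte_list2string ebyte_list → Spec_ebyte_list2string ebyte_list (ebyte_list2string ebyte_list)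

-- ===== LEMMAS AND PROOFS =====

-- reference: per-element recursion with a countdown r = steps left until the next newline
def specF : List Int → Nat → List Char
  | [], _ => []
  | x :: xs, r =>
      Char.ofNat x.toNat :: (if r = 1 then '\n' :: specF xs 80 else specF xs (r - 1))

-- A's fold, with acc and counter generalized, equals specF with r = 80 - (c-1) % 80
theorem foldA_eq_specF (l : List Int) :
    ∀ (acc : List Char) (c : Int),
      (l.foldl (fun (p : List Char × Int) x =>
        let s := p.1 ++ [Char.ofNat x.toNat]
        let s := if p.2 % 80 = 0 then s ++ ['\n'] else s
        (s, p.2 + 1)) (acc, c)).1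
      = acc ++ specF l (80 - ((c - 1) % 80)).toNat := by
  induction l with
  | nil => intro acc c; simp [specF]
  | cons x xs ih =>
    intro acc c
    simp only [List.foldl_cons, specF]
    by_cases h : c % 80 = 0
    · have h1 : (80 - ((c - 1) % 80)).toNat = 1 := by omega
      have h2 : (80 - ((c + 1 - 1) % 80)).toNat = 80 := by omega
      simp only [h, h1]
      rw [ih, h2]
      simp
    · have h1 : (80 - ((c - 1) % 80)).toNat ≠ 1 := by omega
      have h2 : (80 - ((c + 1 - 1) % 80)).toNat = (80 - ((c - 1) % 80)).toNat - 1 := by omega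
      simp only [if_neg h, if_neg h1]
      rw [ih, h2]
      simp

-- specF unrolled over a whole block of r elements
theorem specF_block (l : List Int) :
    ∀ r : Nat, 1 ≤ r → r ≤ 80 →
      specF l r = (l.take r).map (fun x => Char.ofNat x.toNat)
        ++ (if r ≤ l.length then '\n' :: specF (l.drop r) 80 else []) := by
  induction l with
  | nil => intro r h1 _; simp [specF]; omega
  | cons x xs ih =>
    intro r h1 h2
    by_cases hr : r = 1
    · subst hr; simp [specF]
    · have hxs := ih (r - 1) (by omega) (by omega)
      simp only [specF, if_neg hr, hxs]
      have ht : (x :: xs).take r = x :: xs.take (r - 1) := by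
        cases r with
        | zero => omega
        | succ n => simp [List.take_succ_cons]
      have hd : (x :: xs).drop r = xs.drop (r - 1) := by
        cases r with
        | zero => omega
        | succ n => simp
      rw [ht, hd]
      simp only [List.map_cons, List.cons_append]
      congr 1
      by_cases hle : r - 1 ≤ xs.length
      · rw [if_pos hle, if_pos (by simp; omega)]
      · rw [if_neg hle, if_neg (by simp; omega)]

theorem chunks_eq_specF (l : List Int) :
    ∀ i : Nat, ebyteChunks l i = specF (l.drop i) 80 := by
  intro i
  induction hn : l.length - i using Nat.strong_induction_on generalizing i with
  | _ n ih =>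
    unfold ebyteChunks
    by_cases h : i < l.length
    · rw [dif_pos h]
      have hsl : PySem.List.slice l (some (i : Int)) (some ((i : Int) + 80)) =
          (l.drop i).take 80 := by
        have := PySem.List.slice_natCast_add l i 80
        push_cast at this ⊢
        exact this
      rw [specF_block (l.drop i) 80 (by omega) (by omega)]
      simp only [hsl, List.length_take, List.length_drop]
      by_cases h80 : 80 ≤ l.length - i
      · have hb : min 80 (l.length - i) = 80 := by omega
        rw [if_pos hb, if_pos h80, List.drop_drop,
          ih (l.length - (i + 80)) (by omega) (i + 80) rfl]
        simp
      · have hb : min 80 (l.length - i) ≠ 80 := by omega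
        rw [if_neg hb, if_neg h80]
        have hd : l.drop (i + 80) = [] := by
          apply List.drop_eq_nil_of_le; omega
        rw [ih (l.length - (i + 80)) (by omega) (i + 80) rfl, hd]
        simp [specF]
    · rw [dif_neg h]
      have : l.drop i = [] := by apply List.drop_eq_nil_of_le; omega
      rw [this]; rfl

-- ===== VERDICT (by name: the statement is the Claim_ definition above) =====
theorem ebyte_list2string_spec : Claim_equal_ebyte_list2string := by
  intro l _ _
  unfold Spec_ebyte_list2string ebyte_list2string ebyte_list2string_alt
  rw [chunks_eq_specF l 0, List.drop_zero]
  have := foldA_eq_specF l [] 1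
  simp only [List.nil_append] at this
  norm_num at this
  simp [this]
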